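-- pv_equiv track=rewrite | github.com/silantjev/Symbolic-Calculator | graph.py | splitting2
-- ===== SOURCE A (Python) =====
-- def splitting2(expr, operations):
--     """ Searches first operation from 'operations'
--     in the top level parts of the expression 'expr'
--     ("level" means the depth of the nested parentheses),
--     returns index and operation to split the expression into 2 parts.
--
--     Note that the operations are searched in the order of 'operations',
--     not by their positions in the expression;
--     this gives a little different graph,
--     but it does not affect the final result.
--     """
--
--     level = 0 # top level
--     # The variable 'end' means the index of the previous ')'
--     end = -1 # The value -1 means that there was not ')' before
--     for i, s in enumerate(expr):
--         if s == '(':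
--             if level == 0:
--                 # Check the expression before all '(' (if end=-1) and between ')', '(':
--                 expr_to_check = expr[end+1:i]
--                 for oper in operations:
--                     j = expr_to_check.find(oper)
--                     if j != -1:
--                         return end+1+j, oper
--             level += 1
--         elif s == ')':
--             end = i
--             level -= 1
--     # Finally, check the expression after all ')':
--     for oper in operations:
--         expr_to_check = expr[end+1:]
--         j = expr_to_check.find(oper)
--         if j != -1:
--             return end+1+j, oper
-- ===== SOURCE B (Python) =====
-- def splitting2(expr, operations):
--     # Pass 1: collect the top-level segments (start index, text) delimited
--     # by depth-0 '(' boundaries and the last ')' seen so far.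
--     segments = []
--     level = 0
--     end = -1  # index of the previous ')' (-1 if none yet)
--     for i, s in enumerate(expr):
--         if s == '(':
--             if level == 0:
--                 segments.append((end + 1, expr[end + 1:i]))
--             level += 1
--         elif s == ')':
--             end = i
--             level -= 1
--     segments.append((end + 1, expr[end + 1:]))
--     # Pass 2: search the operations (in their given order) in each segment.
--     for start, seg in segments:
--         for oper in operations:
--             j = seg.find(oper)
--             if j != -1:
--                 return start + j, oper
-- ===== Notes on version B (the rewrite author's own statement) =====
-- stated objective: alternative
-- what changed: B replaces A's interleaved scan-and-search with a two-phase decomposition: one pass collects the top-level segments (start index, text), then a second loop searches the operations in each collected segment.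
import Mathlib
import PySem

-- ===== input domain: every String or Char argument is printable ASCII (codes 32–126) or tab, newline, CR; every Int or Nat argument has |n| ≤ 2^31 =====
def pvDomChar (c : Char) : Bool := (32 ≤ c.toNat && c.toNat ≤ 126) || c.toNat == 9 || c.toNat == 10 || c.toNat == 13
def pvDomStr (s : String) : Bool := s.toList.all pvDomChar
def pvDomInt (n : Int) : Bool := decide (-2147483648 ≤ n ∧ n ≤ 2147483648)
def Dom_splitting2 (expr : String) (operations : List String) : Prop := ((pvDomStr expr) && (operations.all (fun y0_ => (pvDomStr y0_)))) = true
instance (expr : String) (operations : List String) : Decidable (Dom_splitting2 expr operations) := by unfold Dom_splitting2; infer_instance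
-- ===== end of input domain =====

-- B: two-phase decomposition (collect top-level segments, then search them); same values as A, no speed claim.

-- ===== PORT A =====
-- inner 'for oper in operations' loop of A: first oper found in seg, with its find index
def pvFindOpA (seg : String) : List String → Option (Int × String)
  | [] => none
  | oper :: rest =>
    let j := PySem.Str.find seg oper
    if j ≠ -1 then some (j, oper) else pvFindOpA seg rest

-- the 'for i, s in enumerate(expr)' loop, state (level, end); early return via Option
def pvALoop (expr : String) (operations : List String) :
    List (Int × Char) → Int → Int → Option (Int × String)
  | [], _, e =>
    -- final check of expr[end+1:]
    match pvFindOpA (PySem.Str.slice expr (some (e + 1)) none) operations with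
    | some (j, oper) => some (e + 1 + j, oper)
    | none => none
  | (i, s) :: rest, level, e =>
    if s = '(' then
      if level = 0 then
        match pvFindOpA (PySem.Str.slice expr (some (e + 1)) (some i)) operations with
        | some (j, oper) => some (e + 1 + j, oper)
        | none => pvALoop expr operations rest (level + 1) e
      else pvALoop expr operations rest (level + 1) e
    else if s = ')' then pvALoop expr operations rest (level - 1) i
    else pvALoop expr operations rest level e

def splitting2 (expr : String) (operations : List String) : Option (Int × String) :=
  pvALoop expr operations (PySem.List.enumerate expr.toList 0) 0 (-1)

-- ===== PORT B =====
-- pass 1: collect the top-level segments (start index, text)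
def pvSegsLoop (expr : String) : List (Int × Char) → Int → Int → List (Int × String)
  | [], _, e => [(e + 1, PySem.Str.slice expr (some (e + 1)) none)]
  | (i, s) :: rest, level, e =>
    if s = '(' then
      (if level = 0 then [(e + 1, PySem.Str.slice expr (some (e + 1)) (some i))] else [])
        ++ pvSegsLoop expr rest (level + 1) e
    else if s = ')' then pvSegsLoop expr rest (level - 1) i
    else pvSegsLoop expr rest level e

-- inner 'for oper in operations' loop of B's pass 2
def pvFindOpB (seg : String) : List String → Option (Int × String)
  | [] => none
  | oper :: rest =>
    let j := PySem.Str.find seg oper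
    if j ≠ -1 then some (j, oper) else pvFindOpB seg rest

-- pass 2: search the operations in each segment, in order
def pvSearchSegs (operations : List String) : List (Int × String) → Option (Int × String)
  | [] => none
  | (start, seg) :: rest =>
    match pvFindOpB seg operations with
    | some (j, oper) => some (start + j, oper)
    | none => pvSearchSegs operations rest

def splitting2_alt (expr : String) (operations : List String) : Option (Int × String) :=
  pvSearchSegs operations (pvSegsLoop expr (PySem.List.enumerate expr.toList 0) 0 (-1))

-- ===== PRECONDITION & SPEC =====
def Spec_splitting2 (expr : String) (operations : List String) (out : Option (Int × String)) : Prop := out = splitting2_alt expr operations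
instance (expr : String) (operations : List String) (out : Option (Int × String)) : Decidable (Spec_splitting2 expr operations out) := by unfold Spec_splitting2; infer_instance

-- ===== CLAIM (what is proved, stated in full; the proofs are below) =====
def Claim_equal_splitting2 : Prop := ∀ (expr : String) (operations : List String), Dom_splitting2 expr operations → Spec_splitting2 expr operations (splitting2 expr operations)

-- ===== LEMMAS AND PROOFS =====

theorem pvFindOpA_eq_B (seg : String) (ops : List String) :
    pvFindOpA seg ops = pvFindOpB seg ops := by
  induction ops with
  | nil => rfl
  | cons oper rest ih => simp [pvFindOpA, pvFindOpB, ih]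

theorem pvALoop_eq (expr : String) (ops : List String) (l : List (Int × Char))
    (level e : Int) :
    pvALoop expr ops l level e = pvSearchSegs ops (pvSegsLoop expr l level e) := by
  induction l generalizing level e with
  | nil =>
    cases h : pvFindOpB (PySem.Str.slice expr (some (e + 1)) none) ops with
    | some v => simp [pvALoop, pvSegsLoop, pvSearchSegs, pvFindOpA_eq_B, h]
    | none => simp [pvALoop, pvSegsLoop, pvSearchSegs, pvFindOpA_eq_B, h]
  | cons p rest ih =>
    obtain ⟨i, s⟩ := p
    by_cases hpar : s = '('
    · by_cases hlev : level = 0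
      · subst hpar hlev
        cases h : pvFindOpB (PySem.Str.slice expr (some (e + 1)) (some i)) ops with
        | some v => simp [pvALoop, pvSegsLoop, pvSearchSegs, pvFindOpA_eq_B, h]
        | none => simp [pvALoop, pvSegsLoop, pvSearchSegs, pvFindOpA_eq_B, h, ih]
      · simp [pvALoop, pvSegsLoop, hpar, hlev, ih]
    · by_cases hcl : s = ')'
      · simp [pvALoop, pvSegsLoop, hcl, ih]
      · simp [pvALoop, pvSegsLoop, hpar, hcl, ih]

-- ===== VERDICT (by name: the statement is the Claim_ definition above) =====
theorem splitting2_spec : Claim_equal_splitting2 := by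
  intro expr operations _
  unfold Spec_splitting2 splitting2 splitting2_alt
  exact pvALoop_eq expr operations _ 0 (-1)
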